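-- pv_equiv track=rewrite | github.com/upgradingconstantly/SCALPEL | scalpel/offtarget/searcher.py | _build_seed_windows
-- ===== SOURCE A (Python) =====
-- from typing import List, Optional, Dict, Any, Tuple
--
-- def _build_seed_windows(sequence_length: int, n_chunks: int) -> List[Tuple[int, int]]:
--     """
--     Partition the sequence into windows used for seed filtering.
--     Any sequence within k mismatches must match at least one of k+1 windows.
--     """
--     windows: List[Tuple[int, int]] = []
--     for i in range(n_chunks):
--         start = (sequence_length * i) // n_chunks
--         end = (sequence_length * (i + 1)) // n_chunks
--         if end > start:
--             windows.append((start, end))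
--     return windows
-- ===== SOURCE B (Python) =====
-- from typing import List, Tuple
--
-- def _build_seed_windows(sequence_length: int, n_chunks: int) -> List[Tuple[int, int]]:
--     # Bresenham-style chunking: one divmod up front, then an integer error
--     # accumulator decides which windows get the extra unit; no division in the loop.
--     if n_chunks <= 0:
--         return []
--     base, rem = divmod(sequence_length, n_chunks)
--     windows: List[Tuple[int, int]] = []
--     start = 0
--     err = 0
--     for _ in range(n_chunks):
--         step = base
--         err += rem
--         if err >= n_chunks:
--             step += 1
--             err -= n_chunks
--         end = start + step
--         if step > 0:
--             windows.append((start, end))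
--         start = end
--     return windows
-- ===== Notes on version B (the rewrite author's own statement) =====
-- stated objective: alternative
-- what changed: B computes window sizes with a Bresenham-style error accumulator: one divmod(sequence_length, n_chunks) up front, then each window's length is base or base+1 decided by an integer error counter, with no division inside the loop; A recomputes two floor-division boundaries per iteration.
import Mathlib
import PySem

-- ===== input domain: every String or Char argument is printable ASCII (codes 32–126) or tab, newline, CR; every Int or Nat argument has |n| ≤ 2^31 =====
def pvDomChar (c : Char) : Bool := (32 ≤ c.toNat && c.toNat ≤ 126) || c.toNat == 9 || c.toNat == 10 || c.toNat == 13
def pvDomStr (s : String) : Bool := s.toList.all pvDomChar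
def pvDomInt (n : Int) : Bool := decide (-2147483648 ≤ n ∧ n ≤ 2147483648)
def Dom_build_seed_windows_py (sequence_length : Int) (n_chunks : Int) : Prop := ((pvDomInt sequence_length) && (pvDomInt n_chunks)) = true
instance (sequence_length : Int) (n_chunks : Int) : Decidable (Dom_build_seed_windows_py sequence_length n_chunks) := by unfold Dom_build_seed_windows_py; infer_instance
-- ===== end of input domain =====

-- B replaces A's two floor divisions per iteration by a Bresenham-style error accumulator
-- (one divmod up front, only additions/comparisons in the loop): an alternative algorithm.


-- ===== PORT A =====
-- A: for each i in range(n_chunks), append (L*i//n, L*(i+1)//n) when end > start.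
def build_seed_windows_py (sequence_length : Int) (n_chunks : Int) : List (Int × Int) :=
  (PySem.List.pyRange 0 n_chunks 1).foldl
    (fun windows i =>
      let start := PySem.Int.floordiv (sequence_length * i) n_chunks
      let e := PySem.Int.floordiv (sequence_length * (i + 1)) n_chunks
      if e > start then windows ++ [(start, e)] else windows)
    []

-- ===== PORT B =====
-- B: Bresenham-style chunking — one divmod up front, an error accumulator in the loop.
def build_seed_windows_py_alt (sequence_length : Int) (n_chunks : Int) : List (Int × Int) :=
  if n_chunks ≤ 0 then []
  else
    let base := PySem.Int.floordiv sequence_length n_chunks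
    let rem := PySem.Int.mod sequence_length n_chunks
    ((PySem.List.pyRange 0 n_chunks 1).foldl
      (fun (st : List (Int × Int) × Int × Int) _ =>
        let err1 := st.2.2 + rem
        let step := if err1 ≥ n_chunks then base + 1 else base
        let err2 := if err1 ≥ n_chunks then err1 - n_chunks else err1
        let e := st.2.1 + step
        ((if step > 0 then st.1 ++ [(st.2.1, e)] else st.1), e, err2))
      ([], 0, 0)).1

-- ===== PRECONDITION & SPEC =====
def Spec_build_seed_windows_py (sequence_length : Int) (n_chunks : Int) (out : List (Int × Int)) : Prop := out = build_seed_windows_py_alt sequence_length n_chunks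
instance (sequence_length : Int) (n_chunks : Int) (out : List (Int × Int)) : Decidable (Spec_build_seed_windows_py sequence_length n_chunks out) := by unfold Spec_build_seed_windows_py; infer_instance

-- ===== CLAIM (what is proved, stated in full; the proofs are below) =====
def Claim_equal_build_seed_windows_py : Prop := ∀ (sequence_length : Int) (n_chunks : Int), Dom_build_seed_windows_py sequence_length n_chunks → Spec_build_seed_windows_py sequence_length n_chunks (build_seed_windows_py sequence_length n_chunks)

-- ===== LEMMAS AND PROOFS =====

-- Arithmetic core: stepping the error accumulator computes the next floor boundary.
theorem pv_step (L n k : Int) (hn : 0 < n) :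
    ((L % n * k) % n + L % n ≥ n →
        (L * (k + 1)) / n = (L * k) / n + (L / n + 1) ∧
        (L % n * (k + 1)) % n = (L % n * k) % n + L % n - n) ∧
    (¬ ((L % n * k) % n + L % n ≥ n) →
        (L * (k + 1)) / n = (L * k) / n + L / n ∧
        (L % n * (k + 1)) % n = (L % n * k) % n + L % n) := by
  have hne : n ≠ 0 := by omega
  set r := L % n with hr
  set q := L / n with hq
  have hL : n * q + r = L := Int.mul_ediv_add_emod L n
  have hr0 : 0 ≤ r := Int.emod_nonneg L hne
  have hrn : r < n := Int.emod_lt_of_pos L hn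
  set m := (r * k) / n with hm
  set e := (r * k) % n with he
  have hrk : n * m + e = r * k := Int.mul_ediv_add_emod (r * k) n
  have he0 : 0 ≤ e := Int.emod_nonneg _ hne
  have hen : e < n := Int.emod_lt_of_pos _ hn
  have hLk : L * k = r * k + n * (q * k) := by rw [← hL]; ring
  have hLk1 : L * (k + 1) = r * (k + 1) + n * (q * (k + 1)) := by rw [← hL]; ring
  have hdLk : (L * k) / n = m + q * k := by
    rw [hLk, Int.add_mul_ediv_left _ _ hne, ← hm]
  constructor
  · intro hge
    have hrk1 : r * (k + 1) = (e + r - n) + n * (m + 1) :=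
      calc r * (k + 1) = r * k + r := by ring
        _ = (n * m + e) + r := by rw [hrk]
        _ = (e + r - n) + n * (m + 1) := by ring
    have hd1 : (r * (k + 1)) / n = m + 1 := by
      rw [hrk1, Int.add_mul_ediv_left _ _ hne,
          Int.ediv_eq_zero_of_lt (by omega) (by omega)]
      omega
    have hm1 : (r * (k + 1)) % n = e + r - n := by
      rw [hrk1, Int.add_mul_emod_self_left, Int.emod_eq_of_lt (by omega) (by omega)]
    refine ⟨?_, hm1⟩
    rw [hLk1, Int.add_mul_ediv_left _ _ hne, hd1, hdLk]; ring
  · intro hlt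
    have hrk1 : r * (k + 1) = (e + r) + n * m :=
      calc r * (k + 1) = r * k + r := by ring
        _ = (n * m + e) + r := by rw [hrk]
        _ = (e + r) + n * m := by ring
    have hd1 : (r * (k + 1)) / n = m := by
      rw [hrk1, Int.add_mul_ediv_left _ _ hne,
          Int.ediv_eq_zero_of_lt (by omega) (by omega)]
      omega
    have hm1 : (r * (k + 1)) % n = e + r := by
      rw [hrk1, Int.add_mul_emod_self_left, Int.emod_eq_of_lt (by omega) (by omega)]
    refine ⟨?_, hm1⟩
    rw [hLk1, Int.add_mul_ediv_left _ _ hne, hd1, hdLk]; ring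

-- Loop invariant: after k iterations B's state is (A's windows over 0..k-1,
-- the boundary L*k//n, the error (L%n * k) % n).
theorem pv_inv (L n : Int) (hn : 0 < n) : ∀ (k : Int), 0 ≤ k → k ≤ n →
    (PySem.List.pyRange 0 k 1).foldl
      (fun (st : List (Int × Int) × Int × Int) _ =>
        let err1 := st.2.2 + PySem.Int.mod L n
        let step := if err1 ≥ n then PySem.Int.floordiv L n + 1 else PySem.Int.floordiv L n
        let err2 := if err1 ≥ n then err1 - n else err1
        let e := st.2.1 + step
        ((if step > 0 then st.1 ++ [(st.2.1, e)] else st.1), e, err2))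
      ([], 0, 0)
    = ((PySem.List.pyRange 0 k 1).foldl
        (fun windows i =>
          let start := PySem.Int.floordiv (L * i) n
          let e := PySem.Int.floordiv (L * (i + 1)) n
          if e > start then windows ++ [(start, e)] else windows)
        [],
       (L * k) / n, (L % n * k) % n) := by
  have hfd : ∀ a : Int, PySem.Int.floordiv a n = a / n :=
    fun a => PySem.Int.floordiv_eq_ediv_of_pos hn
  have hmd : PySem.Int.mod L n = L % n := PySem.Int.mod_eq_emod_of_pos hn
  intro k
  induction k using Int.induction_on with
  | zero =>
    intro _ _
    rw [PySem.List.pyRange_one_eq_nil (by omega : (0:Int) ≤ (0:Int))]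
    simp
  | pred k _ => intro h _; omega
  | succ k ih =>
    intro _ hk
    rw [PySem.List.pyRange_one_succ_right (by omega : (0:Int) ≤ (k:Int)),
        List.foldl_append, List.foldl_append, ih (by omega) (by omega)]
    simp only [List.foldl_cons, List.foldl_nil, hfd, hmd]
    obtain ⟨hge, hlt⟩ := pv_step L n k hn
    by_cases hc : (L % n * k) % n + L % n ≥ n
    · obtain ⟨hd, hm⟩ := hge hc
      rw [if_pos hc, if_pos hc, hd, hm]
      by_cases hs : L / n + 1 > 0
      · rw [if_pos hs, if_pos (show L * (k:Int) / n + (L / n + 1) > L * (k:Int) / n by omega)]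
      · rw [if_neg hs, if_neg (show ¬ (L * (k:Int) / n + (L / n + 1) > L * (k:Int) / n) by omega)]
    · obtain ⟨hd, hm⟩ := hlt hc
      rw [if_neg hc, if_neg hc, hd, hm]
      by_cases hs : L / n > 0
      · rw [if_pos hs, if_pos (show L * (k:Int) / n + L / n > L * (k:Int) / n by omega)]
      · rw [if_neg hs, if_neg (show ¬ (L * (k:Int) / n + L / n > L * (k:Int) / n) by omega)]

-- ===== VERDICT (by name: the statement is the Claim_ definition above) =====
theorem build_seed_windows_py_spec : Claim_equal_build_seed_windows_py := by
  intro L n _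
  unfold Spec_build_seed_windows_py build_seed_windows_py build_seed_windows_py_alt
  by_cases hn : n ≤ 0
  · rw [if_pos hn, PySem.List.pyRange_one_eq_nil (by omega : n ≤ (0:Int))]
    simp
  · rw [if_neg hn]
    have := pv_inv L n (by omega) n (by omega) (by omega)
    simp only at this ⊢
    rw [this]
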